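-- pv_equiv track=rewrite | github.com/Aayush3014/Placement_Prep | Binary_Search/Killing Spree.py | killinSpree
-- ===== SOURCE A (Python) =====
-- def killinSpree (n):
--
--     p = lambda n: n*(n+1)*(2*n+1)//6
--
--     lo, hi = 0, n+1
--     while lo < hi:
--         mi = lo+(hi-lo)//2
--         if p(mi) > n:
--             hi = mi
--         else:
--             lo = mi+1
--
--     return lo-1
-- ===== SOURCE B (Python) =====
-- def killinSpree(n):
--     # forward scan maintaining the running sum of squares instead of bisection
--     total = 0
--     m = 0
--     while total <= n:
--         m += 1
--         total += m * m
--     return m - 1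
-- ===== Notes on version B (the rewrite author's own statement) =====
-- stated objective: simpler
-- what changed: Replaced the binary search over the prefix-sum-of-squares predicate with a direct forward scan that accumulates the running sum of squares and stops at the first overflow; negative inputs fall out naturally because the loop body never runs.
import Mathlib
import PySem

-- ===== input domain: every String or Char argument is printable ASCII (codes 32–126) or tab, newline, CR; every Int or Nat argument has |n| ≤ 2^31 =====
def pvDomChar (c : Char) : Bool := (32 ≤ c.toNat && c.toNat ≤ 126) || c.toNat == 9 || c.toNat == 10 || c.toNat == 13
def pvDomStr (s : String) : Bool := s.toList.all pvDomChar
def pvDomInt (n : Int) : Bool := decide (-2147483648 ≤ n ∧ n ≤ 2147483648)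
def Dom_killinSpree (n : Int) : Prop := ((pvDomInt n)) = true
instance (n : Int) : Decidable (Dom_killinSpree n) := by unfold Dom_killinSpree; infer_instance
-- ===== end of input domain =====

-- B replaces A's binary search by a direct forward scan accumulating the running sum of squares (simpler; not faster).

-- ===== PORT A =====
-- the lambda p of A
def pvP (m : Int) : Int := PySem.Int.floordiv (m * (m + 1) * (2 * m + 1)) 6

-- the while-loop of A, state (lo, hi); fuel is a totality guard only (hi - lo shrinks
-- every iteration, so (n+1).toNat + 1 steps always suffice — proved in pvLoopA_spec)
def pvLoopA (fuel : Nat) (n lo hi : Int) : Int :=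
  match fuel with
  | 0 => lo
  | fuel + 1 =>
    if lo < hi then
      let mi := lo + PySem.Int.floordiv (hi - lo) 2
      if pvP mi > n then pvLoopA fuel n lo mi else pvLoopA fuel n (mi + 1) hi
    else lo

def killinSpree (n : Int) : Int := pvLoopA ((n + 1).toNat + 1) n 0 (n + 1) - 1

-- ===== PORT B =====
-- the while-loop of B, state (total, m); fuel is a totality guard only (total grows by
-- (m+1)² ≥ 1 each iteration, so (n+1).toNat + 1 steps always suffice — proved in pvLoopB_spec)
def pvLoopB (fuel : Nat) (n total m : Int) : Int :=
  match fuel with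
  | 0 => m - 1
  | fuel + 1 =>
    if total ≤ n then pvLoopB fuel n (total + (m + 1) * (m + 1)) (m + 1) else m - 1

def killinSpree_alt (n : Int) : Int := pvLoopB ((n + 1).toNat + 1) n 0 0

-- ===== PRECONDITION & SPEC =====
def Spec_killinSpree (n : Int) (out : Int) : Prop := out = killinSpree_alt n
instance (n : Int) (out : Int) : Decidable (Spec_killinSpree n out) := by unfold Spec_killinSpree; infer_instance

-- ===== CLAIM (what is proved, stated in full; the proofs are below) =====
def Claim_equal_killinSpree : Prop := ∀ (n : Int), Dom_killinSpree n → Spec_killinSpree n (killinSpree n)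

-- ===== LEMMAS AND PROOFS =====

-- sum of squares 1² + … + k²
def pvQ : Nat → Int
  | 0 => 0
  | k + 1 => pvQ k + ((k : Int) + 1) * ((k : Int) + 1)

lemma pvQ_nonneg (k : Nat) : 0 ≤ pvQ k := by
  induction k with
  | zero => simp [pvQ]
  | succ k ih => have := mul_self_nonneg ((k : Int) + 1); simp [pvQ]; omega

lemma pvQ_succ_ge (k : Nat) : pvQ k + 1 ≤ pvQ (k + 1) := by
  have h : 1 ≤ ((k : Int) + 1) * ((k : Int) + 1) := by nlinarith [Int.natCast_nonneg k]
  simp [pvQ]; omega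

lemma pvQ_ge (k : Nat) : (k : Int) ≤ pvQ k := by
  induction k with
  | zero => simp [pvQ]
  | succ k ih => have := pvQ_succ_ge k; push_cast; omega

lemma pvQ_mono {a b : Nat} (h : a ≤ b) : pvQ a ≤ pvQ b := by
  induction b with
  | zero => interval_cases a; omega
  | succ b ih =>
    rcases Nat.lt_or_ge a (b + 1) with h' | h'
    · have := pvQ_succ_ge b; have := ih (by omega); omega
    · have : a = b + 1 := by omega
      subst this; omega

lemma six_pvQ (k : Nat) : 6 * pvQ k = (k : Int) * ((k : Int) + 1) * (2 * (k : Int) + 1) := by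
  induction k with
  | zero => simp [pvQ]
  | succ k ih => simp only [pvQ]; push_cast; ring_nf; ring_nf at ih; linarith

lemma pvP_eq (m : Int) (hm : 0 ≤ m) : pvP m = pvQ m.toNat := by
  have hc : (m.toNat : Int) = m := Int.toNat_of_nonneg hm
  have h6 : m * (m + 1) * (2 * m + 1) = 6 * pvQ m.toNat := by
    rw [← hc]; exact (six_pvQ m.toNat).symm
  rw [pvP, h6, PySem.Int.floordiv_eq_ediv_of_pos (by omega)]
  exact Int.mul_ediv_cancel_left _ (by norm_num)

-- the characterising predicate: r is the answer for n
def pvG (n r : Int) : Prop :=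
  (r = -1 ∧ n < 0) ∨ (0 ≤ r ∧ pvQ r.toNat ≤ n ∧ n < pvQ (r.toNat + 1))

lemma pvG_uniq {n r₁ r₂ : Int} (h₁ : pvG n r₁) (h₂ : pvG n r₂) : r₁ = r₂ := by
  rcases h₁ with ⟨e₁, hn₁⟩ | ⟨hr₁, hle₁, hlt₁⟩ <;> rcases h₂ with ⟨e₂, hn₂⟩ | ⟨hr₂, hle₂, hlt₂⟩
  · omega
  · have := pvQ_nonneg r₂.toNat; omega
  · have := pvQ_nonneg r₁.toNat; omega
  · rcases lt_trichotomy r₁ r₂ with h | h | h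
    · have hle : r₁.toNat + 1 ≤ r₂.toNat := by omega
      have := pvQ_mono hle; omega
    · exact h
    · have hle : r₂.toNat + 1 ≤ r₁.toNat := by omega
      have := pvQ_mono hle; omega

lemma pvLoopB_spec (n : Int) :
    ∀ (fuel : Nat) (k : Nat), (n + 1 - pvQ k).toNat < fuel → (k = 0 ∨ pvQ (k - 1) ≤ n) →
      pvG n (pvLoopB fuel n (pvQ k) (k : Int)) := by
  intro fuel
  induction fuel with
  | zero => intro k hle _; omega
  | succ t ih =>
    intro k hle hpre
    rw [pvLoopB]
    by_cases hc : pvQ k ≤ n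
    · rw [if_pos hc]
      have hstep : pvQ k + ((k : Int) + 1) * ((k : Int) + 1) = pvQ (k + 1) := by
        simp [pvQ]
      have hcast : (k : Int) + 1 = ((k + 1 : Nat) : Int) := by push_cast; ring
      rw [hstep, hcast]
      apply ih (k + 1)
      · have := pvQ_succ_ge k; omega
      · right; simpa using hc
    · rw [if_neg hc]
      rcases hpre with h0 | hq
      · subst h0; exact Or.inl ⟨by simp, by simpa [pvQ] using hc⟩
      · rcases Nat.eq_zero_or_pos k with h0 | hk
        · subst h0; exact Or.inl ⟨by simp, by simpa [pvQ] using hc⟩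
        · refine Or.inr ⟨by omega, ?_, ?_⟩
          · have : ((k : Int) - 1).toNat = k - 1 := by omega
            rw [this]; exact hq
          · have : ((k : Int) - 1).toNat + 1 = k := by omega
            rw [this]; omega

lemma pvG_alt (n : Int) : pvG n (killinSpree_alt n) := by
  have h := pvLoopB_spec n ((n + 1).toNat + 1) 0 (by simp [pvQ]) (Or.inl rfl)
  simpa [pvQ, killinSpree_alt] using h

lemma pvLoopA_spec (n : Int) :
    ∀ (fuel : Nat) (lo hi : Int), (hi - lo).toNat < fuel → 0 ≤ lo → lo ≤ hi → hi ≤ n + 1 →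
      (lo = 0 ∨ pvQ (lo - 1).toNat ≤ n) → (hi = n + 1 ∨ n < pvQ hi.toNat) →
      pvG n (pvLoopA fuel n lo hi - 1) := by
  intro fuel
  induction fuel with
  | zero => intro lo hi hle _ _ _ _ _; omega
  | succ t ih =>
    intro lo hi hle h0 hlh hhn hpre hpost
    by_cases hc : lo < hi
    · rw [pvLoopA, if_pos hc]
      have h2 := PySem.Int.floordiv_eq_ediv_of_pos (a := hi - lo) (b := 2) (by omega)
      have hd := Int.ediv_add_emod (hi - lo) 2
      have hm := Int.emod_nonneg (hi - lo) (by norm_num : (2:Int) ≠ 0)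
      have hm2 := Int.emod_lt_of_pos (hi - lo) (by norm_num : (0:Int) < 2)
      have h3 : 0 ≤ (hi - lo) / 2 := by omega
      have h4 : (hi - lo) / 2 < hi - lo := by omega
      set mi := lo + PySem.Int.floordiv (hi - lo) 2 with hmi
      have hmlo : lo ≤ mi := by omega
      have hmhi : mi < hi := by omega
      have hpq : pvP mi = pvQ mi.toNat := pvP_eq mi (by omega)
      by_cases hb : pvP mi > n
      · rw [if_pos hb]
        exact ih lo mi (by omega) h0 (by omega) (by omega) hpre
          (Or.inr (by rw [← hpq]; omega))
      · rw [if_neg hb]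
        refine ih (mi + 1) hi (by omega) (by omega) (by omega) hhn
          (Or.inr ?_) hpost
        have : (mi + 1 - 1 : Int) = mi := by ring
        rw [this, ← hpq]; omega
    · rw [pvLoopA, if_neg hc]
      have heq : lo = hi := by omega
      subst heq
      rcases eq_or_lt_of_le h0 with h0' | hpos
      · refine Or.inl ⟨by omega, ?_⟩
        rcases hpost with h | h
        · omega
        · simp [← h0'] at h; simpa [pvQ] using h
      · refine Or.inr ⟨by omega, ?_, ?_⟩
        · rcases hpre with h | h
          · omega
          · exact h
        · have hk : (lo - 1).toNat + 1 = lo.toNat := by omega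
          rw [hk]
          rcases hpost with h | h
          · have := pvQ_ge lo.toNat; omega
          · exact h

lemma pvG_a (n : Int) (hn : 0 ≤ n) : pvG n (killinSpree n) := by
  have h := pvLoopA_spec n ((n + 1).toNat + 1) 0 (n + 1) (by omega) (by omega) (by omega)
    (by omega) (Or.inl rfl) (Or.inl rfl)
  simpa [killinSpree] using h

-- ===== VERDICT (by name: the statement is the Claim_ definition above) =====
theorem killinSpree_spec : Claim_equal_killinSpree := by
  intro n _
  unfold Spec_killinSpree
  rcases lt_or_ge n 0 with hn | hn
  · have ha : killinSpree n = -1 := by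
      rw [killinSpree, pvLoopA, if_neg (by omega : ¬ (0:Int) < n + 1)]; norm_num
    have hb : killinSpree_alt n = -1 := by
      rw [killinSpree_alt, pvLoopB, if_neg (by omega)]; norm_num
    rw [ha, hb]
  · exact pvG_uniq (pvG_a n hn) (pvG_alt n)
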